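-- pv_equiv track=rewrite | github.com/yodigi7/advent-of-code | 2017/day09/day09.py | strip_garbage
-- ===== SOURCE A (Python) =====
-- def strip_garbage(input: str) -> str:
--     res = ""
--     garbage = False
--     for char in input:
--         if char == "<":
--             garbage = True
--         elif char == ">":
--             garbage = False
--         elif garbage == False:
--             res += char
--     return res
-- ===== SOURCE B (Python) =====
-- def strip_garbage(input: str) -> str:
--     res = []
--     i = 0
--     n = len(input)
--     while i < n:
--         c = input[i]
--         if c == '<':
--             j = input.find('>', i)
--             if j == -1:
--                 break
--             i = j + 1
--         elif c == '>':
--             i += 1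
--         else:
--             res.append(c)
--             i += 1
--     return ''.join(res)
-- ===== Notes on version B (the rewrite author's own statement) =====
-- stated objective: alternative
-- what changed: Replaced A's per-character boolean-flag accumulation with a cursor/find-based scan that jumps straight past each garbage section with str.find('>') and skips stray '>' characters.
import Mathlib
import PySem

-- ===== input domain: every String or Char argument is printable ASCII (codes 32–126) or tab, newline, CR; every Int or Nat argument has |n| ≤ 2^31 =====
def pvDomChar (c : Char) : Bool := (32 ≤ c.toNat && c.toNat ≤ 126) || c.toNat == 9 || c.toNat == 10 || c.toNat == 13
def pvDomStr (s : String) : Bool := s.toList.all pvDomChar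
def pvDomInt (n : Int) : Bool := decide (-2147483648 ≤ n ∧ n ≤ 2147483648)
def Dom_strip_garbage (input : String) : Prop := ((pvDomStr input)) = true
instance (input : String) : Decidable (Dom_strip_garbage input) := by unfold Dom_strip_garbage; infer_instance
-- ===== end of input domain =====

-- B replaces A's per-character boolean-flag scan by a cursor scan that jumps straight past each
-- garbage section with find('>'); same return value, different decomposition (objective: alternative).

-- ===== PORT A =====
-- A: fold over the characters with state (res, garbage-flag).
def strip_garbage (input : String) : String :=
  let st := input.toList.foldl
    (fun (st : List Char × Bool) char =>
      if char = '<' then (st.1, true)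
      else if char = '>' then (st.1, false)
      else if st.2 = false then (st.1 ++ [char], st.2)
      else st)
    ([], false)
  String.mk st.1

-- ===== PORT B =====
-- B: cursor scan; on '<' find the next '>' (here: dropWhile to it) and jump past it,
-- stopping if there is none; stray '>' is skipped; other chars are emitted.
def sgAltGo : List Char → List Char
  | [] => []
  | c :: rest =>
    if c = '<' then
      -- input.find('>', i): drop up to the next '>'; if none, break
      if h : rest.dropWhile (· ≠ '>') = [] then [] else sgAltGo (rest.dropWhile (· ≠ '>')).tail
    else if c = '>' then sgAltGo rest
    else c :: sgAltGo rest
termination_by l => l.length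
decreasing_by
  · have h1 : (rest.dropWhile (· ≠ '>')).length ≤ rest.length := List.length_dropWhile_le _ _
    have h2 : (rest.dropWhile (· ≠ '>')).length ≠ 0 := by
      simpa [List.length_eq_zero_iff] using h
    simp only [List.length_tail, List.length_cons]; omega
  · simp
  · simp

def strip_garbage_alt (input : String) : String :=
  String.mk (sgAltGo input.toList)

-- ===== PRECONDITION & SPEC =====
def Spec_strip_garbage (input : String) (out : String) : Prop := out = strip_garbage_alt input
instance (input : String) (out : String) : Decidable (Spec_strip_garbage input out) := by unfold Spec_strip_garbage; infer_instance

-- ===== CLAIM (what is proved, stated in full; the proofs are below) =====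
def Claim_equal_strip_garbage : Prop := ∀ (input : String), Dom_strip_garbage input → Spec_strip_garbage input (strip_garbage input)

-- ===== LEMMAS AND PROOFS =====

-- what B computes after an unmatched '<': skip to past the next '>' (or stop)
def sgSkip (l : List Char) : List Char :=
  let tail := l.dropWhile (· ≠ '>')
  if tail = [] then [] else sgAltGo tail.tail

theorem sgAltGo_lt (rest : List Char) : sgAltGo ('<' :: rest) = sgSkip rest := by
  rw [sgAltGo, sgSkip]
  simp

theorem sgAltGo_gt (rest : List Char) : sgAltGo ('>' :: rest) = sgAltGo rest := by
  rw [sgAltGo]; simp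

theorem sgAltGo_other (c : Char) (rest : List Char) (h1 : c ≠ '<') (h2 : c ≠ '>') :
    sgAltGo (c :: rest) = c :: sgAltGo rest := by
  rw [sgAltGo]; simp [h1, h2]

-- the step function of A's fold, named so the invariant can talk about it
def sgStep (st : List Char × Bool) (char : Char) : List Char × Bool :=
  if char = '<' then (st.1, true)
  else if char = '>' then (st.1, false)
  else if st.2 = false then (st.1 ++ [char], st.2)
  else st

-- loop invariant: from flag=false the fold appends sgAltGo l, from flag=true it appends sgSkip l
theorem sg_fold_invariant (l : List Char) :
    (∀ res : List Char, (l.foldl sgStep (res, false)).1 = res ++ sgAltGo l) ∧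
    (∀ res : List Char, (l.foldl sgStep (res, true)).1 = res ++ sgSkip l) := by
  induction l with
  | nil => simp [sgAltGo, sgSkip]
  | cons c rest ih =>
    obtain ⟨ihF, ihT⟩ := ih
    constructor
    · intro res
      by_cases h1 : c = '<'
      · subst h1
        simp only [List.foldl_cons, sgStep, reduceIte]
        rw [ihT, sgAltGo_lt]
      · by_cases h2 : c = '>'
        · subst h2
          simp only [List.foldl_cons, sgStep, reduceIte,
            if_neg (show ¬('>' = '<') by decide)]
          rw [ihF, sgAltGo_gt]
        · simp only [List.foldl_cons, sgStep, if_neg h1, if_neg h2, reduceIte]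
          rw [ihF, sgAltGo_other c rest h1 h2]
          simp
    · intro res
      by_cases h1 : c = '<'
      · subst h1
        simp only [List.foldl_cons, sgStep, reduceIte]
        rw [ihT]
        have : sgSkip ('<' :: rest) = sgSkip rest := by
          unfold sgSkip
          rw [List.dropWhile_cons_of_pos (by decide)]
        rw [this]
      · by_cases h2 : c = '>'
        · subst h2
          simp only [List.foldl_cons, sgStep, reduceIte,
            if_neg (show ¬('>' = '<') by decide)]
          rw [ihF]
          have : sgSkip ('>' :: rest) = sgAltGo rest := by
            unfold sgSkip
            rw [List.dropWhile_cons_of_neg (by decide)]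
            simp
          rw [this]
        · simp only [List.foldl_cons, sgStep, if_neg h1, if_neg h2,
            if_neg (show ¬(true = false) by decide)]
          rw [ihT]
          have : sgSkip (c :: rest) = sgSkip rest := by
            unfold sgSkip
            rw [List.dropWhile_cons_of_pos (by simpa using h2)]
          rw [this]

-- ===== VERDICT (by name: the statement is the Claim_ definition above) =====
theorem strip_garbage_spec : Claim_equal_strip_garbage := by
  intro input _
  unfold Spec_strip_garbage strip_garbage strip_garbage_alt
  have h := (sg_fold_invariant input.toList).1 []
  show String.mk (List.foldl sgStep ([], false) input.toList).1 = _
  rw [h]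
  simp
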